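-- pv_equiv track=rewrite | github.com/winron/back-on-the-boat | scripts/fix-translations.py | is_bad_meaning
-- ===== SOURCE A (Python) =====
-- def is_bad_meaning(meaning):
--     """Check if a meaning is clearly wrong/unhelpful."""
--     m = meaning.lower()
--     patterns = [
--         "surname ",
--         "variant of ",
--         "old variant of ",
--         "abbr. for ",
--         "also pr. [",
--         "also written ",
--         "used in ",
--         "erhua variant of ",
--     ]
--     for p in patterns:
--         if m.startswith(p) or f"; {p}" in m or f"({p}" in m:
--             return True
--     # Check if starts with these
--     if m.startswith("used in "):
--         return True
--     return False
-- ===== SOURCE B (Python) =====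
-- def is_bad_meaning(meaning):
--     """Check if a meaning is clearly wrong/unhelpful.
--
--     Single left-to-right scan: a pattern counts only when it starts at the
--     beginning of the string, right after "; ", or right after "(".
--     """
--     m = meaning.lower()
--     patterns = (
--         "surname ",
--         "variant of ",
--         "old variant of ",
--         "abbr. for ",
--         "also pr. [",
--         "also written ",
--         "used in ",
--         "erhua variant of ",
--     )
--     for i in range(len(m)):
--         if i == 0 or m[i - 1] == '(' or (i >= 2 and m[i - 2] == ';' and m[i - 1] == ' '):
--             if any(m.startswith(p, i) for p in patterns):
--                 return True
--     return False
-- ===== Notes on version B (the rewrite author's own statement) =====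
-- stated objective: alternative
-- what changed: A loops over the eight patterns and for each runs a startswith plus two substring searches over the whole string; B makes one left-to-right scan over positions, testing a cheap anchor (start of string, after '(', after '; ') and matching the patterns only at anchored positions.
import Mathlib
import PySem

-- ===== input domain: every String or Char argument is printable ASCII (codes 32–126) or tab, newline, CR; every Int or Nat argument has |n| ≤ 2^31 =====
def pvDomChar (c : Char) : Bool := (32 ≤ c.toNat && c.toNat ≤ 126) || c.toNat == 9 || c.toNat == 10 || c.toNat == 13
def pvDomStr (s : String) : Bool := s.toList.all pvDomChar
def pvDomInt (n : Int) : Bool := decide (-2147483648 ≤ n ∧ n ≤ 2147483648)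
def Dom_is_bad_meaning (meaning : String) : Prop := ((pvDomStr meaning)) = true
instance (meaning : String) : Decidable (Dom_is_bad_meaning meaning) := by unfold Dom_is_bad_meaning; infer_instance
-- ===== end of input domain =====

-- B replaces A's per-pattern startswith + two substring searches by a single left-to-right
-- scan over positions with an anchor test (start / after "(" / after "; ")  — objective: alternative.


def pvUsedIn : List Char := "used in ".toList

-- the eight literal patterns, shared verbatim by both programs
def pvPats : List (List Char) :=
  ["surname ".toList, "variant of ".toList, "old variant of ".toList, "abbr. for ".toList,
   "also pr. [".toList, "also written ".toList, "used in ".toList, "erhua variant of ".toList]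

-- ===== PORT A =====
-- for-loop with early return = List.any; f"; {p}" = ';' :: ' ' :: p, f"({p}" = '(' :: p
def is_bad_meaning (meaning : String) : Bool :=
  let m := PySem.Chars.lower meaning.toList
  if pvPats.any (fun p =>
      PySem.Chars.startswith m p
      || PySem.Chars.isIn (';' :: ' ' :: p) m
      || PySem.Chars.isIn ('(' :: p) m) then
    true
  else if PySem.Chars.startswith m pvUsedIn then
    true
  else
    false

-- ===== PORT B =====
-- anchor test of Source B: i == 0 or m[i-1] == '(' or (i >= 2 and m[i-2] == ';' and m[i-1] == ' ')
-- (m[i-1]/m[i-2] are only reached with i ≥ 1 / i ≥ 2, so plain Nat subtraction is exact here)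
def pvAnchor (m : List Char) (i : Nat) : Bool :=
  decide (i = 0) || m[i - 1]? == some '(' ||
    (decide (2 ≤ i) && m[i - 2]? == some ';' && m[i - 1]? == some ' ')

-- m.startswith(p, i) with 0 ≤ i ≤ len(m) is exactly: p is a prefix of m[i:]
def is_bad_meaning_alt (meaning : String) : Bool :=
  let m := PySem.Chars.lower meaning.toList
  (List.range m.length).any (fun i =>
    pvAnchor m i && pvPats.any (fun p => PySem.Chars.startswith (m.drop i) p))

-- ===== PRECONDITION & SPEC =====
def Spec_is_bad_meaning (meaning : String) (out : Bool) : Prop := out = is_bad_meaning_alt meaning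
instance (meaning : String) (out : Bool) : Decidable (Spec_is_bad_meaning meaning out) := by unfold Spec_is_bad_meaning; infer_instance

-- ===== CLAIM (what is proved, stated in full; the proofs are below) =====
def Claim_equal_is_bad_meaning : Prop := ∀ (meaning : String), Dom_is_bad_meaning meaning → Spec_is_bad_meaning meaning (is_bad_meaning meaning)

-- ===== LEMMAS AND PROOFS =====

-- a cons pattern is a prefix of l.drop j iff l[j]? is its head and the tail matches at j+1
theorem pv_cons_prefix_drop (l : List Char) (j : Nat) (c : Char) (p : List Char) :
    (c :: p) <+: l.drop j ↔ l[j]? = some c ∧ p <+: l.drop (j + 1) := by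
  have hget : l[j]? = (l.drop j)[0]? := by simp
  have htail : l.drop (j + 1) = (l.drop j).drop 1 := by
    rw [List.drop_drop]
  rcases h : l.drop j with _ | ⟨a, t⟩
  · simp [hget, h, htail]
  · simp [hget, h, htail, List.cons_prefix_cons, eq_comm]

-- every pattern is nonempty
theorem pv_pats_ne_nil : ∀ p ∈ pvPats, p ≠ [] := by decide

theorem pv_used_in_mem : "used in ".toList ∈ pvPats := by decide

-- if some nonempty pattern matches at position i, then i < l.length
theorem pv_lt_length_of_prefix_drop {l p : List Char} {i : Nat}
    (hp : p ≠ []) (h : p <+: l.drop i) : i < l.length := by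
  by_contra hle
  have : l.drop i = [] := List.drop_eq_nil_of_le (by omega)
  rw [this, List.prefix_nil] at h
  exact hp h

-- the heart of the proof: A's per-pattern test equals B's positional scan, on any char list
theorem pv_core_eq (l : List Char) :
    pvPats.any (fun p =>
        PySem.Chars.startswith l p
        || PySem.Chars.isIn (';' :: ' ' :: p) l
        || PySem.Chars.isIn ('(' :: p) l)
      = (List.range l.length).any (fun i =>
        pvAnchor l i && pvPats.any (fun p => PySem.Chars.startswith (l.drop i) p)) := by
  rw [Bool.eq_iff_iff]
  simp only [List.any_eq_true, Bool.or_eq_true, Bool.and_eq_true, List.mem_range,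
    PySem.Chars.startswith_iff, PySem.Chars.isIn_iff_infix]
  constructor
  · rintro ⟨p, hpmem, hcase⟩
    have hpne := pv_pats_ne_nil p hpmem
    rcases hcase with (h | h) | h
    · -- p is a prefix of l: position 0
      refine ⟨0, pv_lt_length_of_prefix_drop hpne (by simpa using h), ?_, p, hpmem, by simpa using h⟩
      simp [pvAnchor]
    · -- "; p" occurs somewhere: position j+2
      obtain ⟨j, hj⟩ := (PySem.Chars.exists_prefix_drop_iff_isIn (';' :: ' ' :: p) l).2
        ((PySem.Chars.isIn_iff_infix _ _).2 h)
      rw [pv_cons_prefix_drop] at hj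
      obtain ⟨h1, hj⟩ := hj
      rw [pv_cons_prefix_drop] at hj
      obtain ⟨h2, hj⟩ := hj
      refine ⟨j + 2, pv_lt_length_of_prefix_drop hpne (by simpa using hj), ?_, p, hpmem, by simpa using hj⟩
      simp [pvAnchor, h1, h2]
    · -- "(p" occurs somewhere: position j+1
      obtain ⟨j, hj⟩ := (PySem.Chars.exists_prefix_drop_iff_isIn ('(' :: p) l).2
        ((PySem.Chars.isIn_iff_infix _ _).2 h)
      rw [pv_cons_prefix_drop] at hj
      obtain ⟨h1, hj⟩ := hj
      refine ⟨j + 1, pv_lt_length_of_prefix_drop hpne hj, ?_, p, hpmem, hj⟩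
      simp [pvAnchor, h1]
  · rintro ⟨i, hi, hanch, p, hpmem, hpref⟩
    refine ⟨p, hpmem, ?_⟩
    by_cases hi0 : i = 0
    · subst hi0; left; left; simpa using hpref
    · simp only [pvAnchor, Bool.or_eq_true, Bool.and_eq_true, decide_eq_true_eq,
        beq_iff_eq] at hanch
      rcases hanch with (h0 | hpar) | hsc
      · exact absurd h0 hi0
      · -- after '(' : "(p" is an infix at position i-1
        right
        rw [← PySem.Chars.isIn_iff_infix, ← PySem.Chars.exists_prefix_drop_iff_isIn]
        refine ⟨i - 1, ?_⟩
        rw [pv_cons_prefix_drop]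
        have e1 : i - 1 + 1 = i := by omega
        exact ⟨hpar, by rwa [e1]⟩
      · -- after "; " : "; p" is an infix at position i-2
        obtain ⟨hsc1, hsp⟩ := hsc
        obtain ⟨h2, hsemi⟩ := hsc1
        left; right
        rw [← PySem.Chars.isIn_iff_infix, ← PySem.Chars.exists_prefix_drop_iff_isIn]
        refine ⟨i - 2, ?_⟩
        rw [pv_cons_prefix_drop]
        refine ⟨hsemi, ?_⟩
        rw [pv_cons_prefix_drop]
        have e1 : i - 2 + 1 = i - 1 := by omega
        rw [e1]
        have e2 : i - 1 + 1 = i := by omega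
        rw [e2]
        exact ⟨hsp, hpref⟩

-- A's trailing "used in " check is subsumed by the main loop
theorem pv_used_in_subsumed (l : List Char)
    (h : PySem.Chars.startswith l pvUsedIn = true) :
    pvPats.any (fun p =>
        PySem.Chars.startswith l p
        || PySem.Chars.isIn (';' :: ' ' :: p) l
        || PySem.Chars.isIn ('(' :: p) l) = true := by
  rw [List.any_eq_true]
  refine ⟨pvUsedIn, pv_used_in_mem, ?_⟩
  simp only [Bool.or_eq_true]
  exact Or.inl (Or.inl h)

-- ===== VERDICT (by name: the statement is the Claim_ definition above) =====
theorem is_bad_meaning_spec : Claim_equal_is_bad_meaning := by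
  intro meaning _
  unfold Spec_is_bad_meaning is_bad_meaning is_bad_meaning_alt
  set l := PySem.Chars.lower meaning.toList with hl
  rw [← pv_core_eq l]
  cases hA : pvPats.any (fun p =>
      PySem.Chars.startswith l p
      || PySem.Chars.isIn (';' :: ' ' :: p) l
      || PySem.Chars.isIn ('(' :: p) l) with
  | true => simp only [hA, if_true]
  | false =>
    have h2 : PySem.Chars.startswith l pvUsedIn = false := by
      cases hh : PySem.Chars.startswith l pvUsedIn with
      | true => rw [pv_used_in_subsumed l hh] at hA; exact absurd hA (by simp)
      | false => rfl
    simp only [hA, h2, Bool.false_eq_true, if_false]
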